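-- pv_equiv track=rewrite | github.com/ersanjeev007/AWS-Architecture-Generator | backend/app/core/ai_architecture_assistant.py | _generate_generic_cost_advice
-- ===== SOURCE A (Python) =====
-- from typing import Dict, List, Optional, Any
--
-- def _generate_generic_cost_advice(services: Dict[str, str]) -> str:
--     """Generate generic cost optimization advice"""
--
--     advice = "Based on your services, consider these cost optimizations:\n\n"
--
--     if any("ec2" in s.lower() for s in services.values()):
--         advice += "- **EC2 Optimization**: Right-size instances, use Reserved Instances for steady workloads\n"
--
--     if any("s3" in s.lower() or "storage" in s.lower() for s in services.values()):
--         advice += "- **Storage Optimization**: Use appropriate S3 storage classes, implement lifecycle policies\n"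
--
--     if any("rds" in s.lower() or "database" in s.lower() for s in services.values()):
--         advice += "- **Database Optimization**: Use read replicas, consider Aurora Serverless for variable workloads\n"
--
--     advice += "- **General**: Implement auto scaling, use CloudWatch for monitoring unused resources\n"
--
--     return advice
-- ===== SOURCE B (Python) =====
-- def _generate_generic_cost_advice(services):
--     """Generate generic cost optimization advice (single-pass flag accumulation)"""
--     has_compute = has_storage = has_database = False
--     for v in services.values():
--         s = v.lower()
--         has_compute = has_compute or "ec2" in s
--         has_storage = has_storage or "s3" in s or "storage" in s
--         has_database = has_database or "rds" in s or "database" in s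
--     parts = ["Based on your services, consider these cost optimizations:\n\n"]
--     if has_compute:
--         parts.append("- **EC2 Optimization**: Right-size instances, use Reserved Instances for steady workloads\n")
--     if has_storage:
--         parts.append("- **Storage Optimization**: Use appropriate S3 storage classes, implement lifecycle policies\n")
--     if has_database:
--         parts.append("- **Database Optimization**: Use read replicas, consider Aurora Serverless for variable workloads\n")
--     parts.append("- **General**: Implement auto scaling, use CloudWatch for monitoring unused resources\n")
--     return "".join(parts)
-- ===== Notes on version B (the rewrite author's own statement) =====
-- stated objective: alternative
-- what changed: Replaces three separate short-circuiting any() scans of services.values() with a single accumulating pass that lowercases each value once and OR-updates three flags, then assembles the result by joining a list of parts.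
import Mathlib
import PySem

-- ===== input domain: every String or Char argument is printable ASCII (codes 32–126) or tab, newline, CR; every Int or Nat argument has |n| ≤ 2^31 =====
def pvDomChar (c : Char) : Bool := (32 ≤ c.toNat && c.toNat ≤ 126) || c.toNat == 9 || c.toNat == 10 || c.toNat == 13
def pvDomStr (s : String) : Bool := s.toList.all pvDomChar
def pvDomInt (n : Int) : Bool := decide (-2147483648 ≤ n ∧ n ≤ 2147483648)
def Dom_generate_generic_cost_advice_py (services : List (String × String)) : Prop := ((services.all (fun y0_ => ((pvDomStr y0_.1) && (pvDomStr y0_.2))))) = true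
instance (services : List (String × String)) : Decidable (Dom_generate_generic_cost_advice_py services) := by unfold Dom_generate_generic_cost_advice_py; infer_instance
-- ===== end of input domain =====

-- B replaces A's three separate any()-scans over services.values() with one
-- accumulating pass that lowercases each value once and OR-updates three flags,
-- then joins the selected advice blocks (objective: alternative decomposition).


-- ===== PORT A =====
def generate_generic_cost_advice_py (services : List (String × String)) : String :=
  let advice := "Based on your services, consider these cost optimizations:\n\n"
  let advice := if services.any (fun p => PySem.Str.isIn "ec2" (PySem.Str.lower p.2)) then
      advice ++ "- **EC2 Optimization**: Right-size instances, use Reserved Instances for steady workloads\n"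
    else advice
  let advice := if services.any (fun p => PySem.Str.isIn "s3" (PySem.Str.lower p.2) || PySem.Str.isIn "storage" (PySem.Str.lower p.2)) then
      advice ++ "- **Storage Optimization**: Use appropriate S3 storage classes, implement lifecycle policies\n"
    else advice
  let advice := if services.any (fun p => PySem.Str.isIn "rds" (PySem.Str.lower p.2) || PySem.Str.isIn "database" (PySem.Str.lower p.2)) then
      advice ++ "- **Database Optimization**: Use read replicas, consider Aurora Serverless for variable workloads\n"
    else advice
  advice ++ "- **General**: Implement auto scaling, use CloudWatch for monitoring unused resources\n"

-- ===== PORT B =====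
def generate_generic_cost_advice_py_alt (services : List (String × String)) : String :=
  let flags := services.foldl (fun (f : Bool × Bool × Bool) p =>
      let s := PySem.Str.lower p.2
      (f.1 || PySem.Str.isIn "ec2" s,
       f.2.1 || PySem.Str.isIn "s3" s || PySem.Str.isIn "storage" s,
       f.2.2 || PySem.Str.isIn "rds" s || PySem.Str.isIn "database" s)) (false, false, false)
  let parts := ["Based on your services, consider these cost optimizations:\n\n"]
  let parts := if flags.1 then parts ++ ["- **EC2 Optimization**: Right-size instances, use Reserved Instances for steady workloads\n"] else parts
  let parts := if flags.2.1 then parts ++ ["- **Storage Optimization**: Use appropriate S3 storage classes, implement lifecycle policies\n"] else parts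
  let parts := if flags.2.2 then parts ++ ["- **Database Optimization**: Use read replicas, consider Aurora Serverless for variable workloads\n"] else parts
  let parts := parts ++ ["- **General**: Implement auto scaling, use CloudWatch for monitoring unused resources\n"]
  PySem.Str.join "" parts

-- ===== PRECONDITION & SPEC =====
def Spec_generate_generic_cost_advice_py (services : List (String × String)) (out : String) : Prop := out = generate_generic_cost_advice_py_alt services
instance (services : List (String × String)) (out : String) : Decidable (Spec_generate_generic_cost_advice_py services out) := by unfold Spec_generate_generic_cost_advice_py; infer_instance

-- ===== CLAIM (what is proved, stated in full; the proofs are below) =====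
def Claim_equal_generate_generic_cost_advice_py : Prop := ∀ (services : List (String × String)), Dom_generate_generic_cost_advice_py services → Spec_generate_generic_cost_advice_py services (generate_generic_cost_advice_py services)

-- ===== LEMMAS AND PROOFS =====

theorem pv_intercalate_nil {α : Type} (l : List (List α)) : ([] : List α).intercalate l = l.flatten := by
  induction l with
  | nil => rfl
  | cons x xs ih =>
    cases xs with
    | nil => simp [List.intercalate]
    | cons y ys =>
      simp only [List.intercalate, List.intersperse] at *
      simpa using ih

-- ''.join(parts) concatenates the parts.
theorem pv_join_eq (l : List String) : PySem.Str.join "" l = String.ofList (l.map String.toList).flatten := by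
  simp [PySem.Str.join, PySem.Chars.join, pv_intercalate_nil]

-- The single accumulating pass of B computes exactly the three any()-scans of A.
theorem pv_flags_eq (l : List (String × String)) (a b c : Bool) :
    l.foldl (fun (f : Bool × Bool × Bool) p =>
      let s := PySem.Str.lower p.2
      (f.1 || PySem.Str.isIn "ec2" s,
       f.2.1 || PySem.Str.isIn "s3" s || PySem.Str.isIn "storage" s,
       f.2.2 || PySem.Str.isIn "rds" s || PySem.Str.isIn "database" s)) (a, b, c)
    = (a || l.any (fun p => PySem.Str.isIn "ec2" (PySem.Str.lower p.2)),
       b || l.any (fun p => PySem.Str.isIn "s3" (PySem.Str.lower p.2) || PySem.Str.isIn "storage" (PySem.Str.lower p.2)),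
       c || l.any (fun p => PySem.Str.isIn "rds" (PySem.Str.lower p.2) || PySem.Str.isIn "database" (PySem.Str.lower p.2))) := by
  induction l generalizing a b c with
  | nil => simp
  | cons hd tl ih =>
    rw [List.foldl_cons]
    show List.foldl _ (_ || _, _ || _ || _, _ || _ || _) tl = _
    rw [ih]
    simp [Bool.or_assoc]

-- ===== VERDICT (by name: the statement is the Claim_ definition above) =====
theorem generate_generic_cost_advice_py_spec : Claim_equal_generate_generic_cost_advice_py := by
  intro services _
  unfold Spec_generate_generic_cost_advice_py generate_generic_cost_advice_py generate_generic_cost_advice_py_alt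
  rw [pv_flags_eq]
  simp only [Bool.false_or]
  split_ifs <;>
    (rw [pv_join_eq, ← String.toList_inj];
     simp only [String.toList_append, String.toList_ofList, List.map_cons, List.map_nil,
       List.flatten_cons, List.flatten_nil, List.cons_append, List.nil_append,
       List.append_assoc, List.append_nil])
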